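-- pv_equiv track=rewrite | github.com/therealityreport/SCREENALYZER | screentime/clustering/contamination_audit.py | find_contiguous_spans
-- ===== SOURCE A (Python) =====
-- from typing import Dict, List, Optional, Tuple
--
-- def find_contiguous_spans(
--     contaminated_indices: List[int],
--     min_contiguous: int = 4
-- ) -> List[Tuple[int, int]]:
--     """
--     Find contiguous spans of contaminated samples.
--
--     Args:
--         contaminated_indices: List of sample indices flagged as contaminated
--         min_contiguous: Minimum span length
--
--     Returns:
--         List of (start_idx, end_idx) tuples for contiguous spans
--     """
--     if not contaminated_indices:
--         return []
--
--     spans = []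
--     current_span_start = contaminated_indices[0]
--     current_span_end = contaminated_indices[0]
--
--     for i in range(1, len(contaminated_indices)):
--         if contaminated_indices[i] == current_span_end + 1:
--             # Extend current span
--             current_span_end = contaminated_indices[i]
--         else:
--             # End current span, start new one
--             if (current_span_end - current_span_start + 1) >= min_contiguous:
--                 spans.append((current_span_start, current_span_end))
--
--             current_span_start = contaminated_indices[i]
--             current_span_end = contaminated_indices[i]
--
--     # Don't forget last span
--     if (current_span_end - current_span_start + 1) >= min_contiguous:
--         spans.append((current_span_start, current_span_end))
--
--     return spans
-- ===== SOURCE B (Python) =====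
-- def find_contiguous_spans(contaminated_indices, min_contiguous=4):
--     """Two staged passes: first compute the cut positions (indices where a new
--     +1-consecutive run begins), then read each span off an adjacent pair of cuts."""
--     xs = contaminated_indices
--     cuts = [i for i in range(len(xs)) if i == 0 or xs[i] != xs[i - 1] + 1]
--     cuts.append(len(xs))
--     return [(xs[a], xs[b - 1])
--             for a, b in zip(cuts, cuts[1:])
--             if b - a >= min_contiguous]
-- ===== Notes on version B (the rewrite author's own statement) =====
-- stated objective: alternative
-- what changed: Replaces A's single-pass start/end accumulator state machine with two staged index passes: first build the list of cut positions (indices where a new +1-consecutive run starts, plus the final length), then read each span directly off adjacent pairs of cuts via indexing.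
import Mathlib
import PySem

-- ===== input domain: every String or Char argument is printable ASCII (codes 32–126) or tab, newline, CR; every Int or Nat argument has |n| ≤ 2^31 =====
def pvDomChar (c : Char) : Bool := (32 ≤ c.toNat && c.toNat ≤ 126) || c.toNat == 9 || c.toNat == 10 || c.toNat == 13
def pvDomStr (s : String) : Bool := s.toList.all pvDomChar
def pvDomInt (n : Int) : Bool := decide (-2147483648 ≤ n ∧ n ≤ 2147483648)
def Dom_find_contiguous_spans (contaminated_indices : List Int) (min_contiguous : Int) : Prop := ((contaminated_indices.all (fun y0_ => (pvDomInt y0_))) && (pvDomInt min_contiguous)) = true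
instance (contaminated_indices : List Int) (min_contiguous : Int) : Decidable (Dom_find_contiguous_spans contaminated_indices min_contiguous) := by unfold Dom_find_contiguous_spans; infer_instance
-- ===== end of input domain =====

-- B replaces A's single-pass start/end accumulator state machine by two staged index
-- passes: compute the cut positions, then read spans off adjacent pairs of cuts.

-- ===== PORT A =====
-- loop body of A's for-loop: state = (spans, current_span_start, current_span_end)
def aStep (m : Int) (st : List (Int × Int) × Int × Int) (v : Int) : List (Int × Int) × Int × Int :=
  if v = st.2.2 + 1 then (st.1, st.2.1, v)
  else ((if st.2.2 - st.2.1 + 1 ≥ m then st.1 ++ [(st.2.1, st.2.2)] else st.1), v, v)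

def find_contiguous_spans (contaminated_indices : List Int) (min_contiguous : Int) : List (Int × Int) :=
  match contaminated_indices with
  | [] => []
  | x :: rest =>
    -- for i in range(1, len): operates on the tail, threading (spans, start, end)
    let st := rest.foldl (aStep min_contiguous) ([], x, x)
    if st.2.2 - st.2.1 + 1 ≥ min_contiguous then st.1 ++ [(st.2.1, st.2.2)] else st.1

-- ===== PORT B =====
-- the comprehension's condition: i == 0 or xs[i] != xs[i-1] + 1
-- (cut positions are nonnegative list indices, kept as Nat; when i = 0 the left disjunct
-- short-circuits in both Python and here, so the value of xs.getD (i-1) is irrelevant)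
def bCond (xs : List Int) (i : Nat) : Bool :=
  i == 0 || !(xs.getD i 0 == xs.getD (i - 1) 0 + 1)

-- cuts = [i for i in range(len(xs)) if …] ; cuts.append(len(xs))
def bCuts (xs : List Int) : List Nat :=
  ((List.range xs.length).filter (bCond xs)) ++ [xs.length]

-- [(xs[a], xs[b-1]) for a, b in zip(cuts, cuts[1:]) if b - a >= min_contiguous]
-- (every pair has a < b, so b - a and b - 1 are computed in Int / in-range Nat exactly)
def find_contiguous_spans_alt (contaminated_indices : List Int) (min_contiguous : Int) : List (Int × Int) :=
  let cuts := bCuts contaminated_indices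
  ((cuts.zip cuts.tail).filter
      (fun p => decide (((p.2 : Int) - (p.1 : Int)) ≥ min_contiguous))).map
    (fun p => (contaminated_indices.getD p.1 0, contaminated_indices.getD (p.2 - 1) 0))

-- ===== PRECONDITION & SPEC =====
def Spec_find_contiguous_spans (contaminated_indices : List Int) (min_contiguous : Int) (out : List (Int × Int)) : Prop := out = find_contiguous_spans_alt contaminated_indices min_contiguous
instance (contaminated_indices : List Int) (min_contiguous : Int) (out : List (Int × Int)) : Decidable (Spec_find_contiguous_spans contaminated_indices min_contiguous out) := by unfold Spec_find_contiguous_spans; infer_instance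

-- ===== CLAIM (what is proved, stated in full; the proofs are below) =====
def Claim_equal_find_contiguous_spans : Prop := ∀ (contaminated_indices : List Int) (min_contiguous : Int), Dom_find_contiguous_spans contaminated_indices min_contiguous → Spec_find_contiguous_spans contaminated_indices min_contiguous (find_contiguous_spans contaminated_indices min_contiguous)

-- ===== LEMMAS AND PROOFS =====

-- reference decomposition: split the list into maximal +1-consecutive runs
def takeRun : Int → List Int → List Int × List Int
  | _, [] => ([], [])
  | prev, y :: ys => if y = prev + 1 then let r := takeRun y ys; (y :: r.1, r.2) else ([], y :: ys)

theorem takeRun_snd_length (p : Int) (l : List Int) : (takeRun p l).2.length ≤ l.length := by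
  induction l generalizing p with
  | nil => simp [takeRun]
  | cons y ys ih =>
    simp only [takeRun]
    split
    · exact Nat.le_succ_of_le (ih y)
    · simp

def runs : List Int → List (List Int)
  | [] => []
  | x :: t => (x :: (takeRun x t).1) :: runs (takeRun x t).2
termination_by l => l.length
decreasing_by exact Nat.lt_succ_of_le (takeRun_snd_length _ _)

def emit (m : Int) (g : List Int) : Option (Int × Int) :=
  match g with
  | [] => none
  | x :: r => if ((r.length : Int) + 1) ≥ m then some (x, x + r.length) else none

def specOf (m : Int) (gs : List (List Int)) : List (Int × Int) := gs.filterMap (emit m)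

-- A's recursion, extracted
def aRun (m : Int) : List Int → Int → Int → List (Int × Int)
  | [], s, e => if e - s + 1 ≥ m then [(s, e)] else []
  | v :: t, s, e =>
    if v = e + 1 then aRun m t s v
    else (if e - s + 1 ≥ m then [(s, e)] else []) ++ aRun m t v v

theorem foldl_aRun (m : Int) (t : List Int) : ∀ (s e : Int) (spans : List (Int × Int)),
    (let st := t.foldl (aStep m) (spans, s, e);
     if st.2.2 - st.2.1 + 1 ≥ m then st.1 ++ [(st.2.1, st.2.2)] else st.1)
      = spans ++ aRun m t s e := by
  induction t with
  | nil =>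
    intro s e spans
    simp only [List.foldl_nil, aRun]
    split_ifs <;> simp
  | cons v t ih =>
    intro s e spans
    rw [List.foldl_cons]
    by_cases hv : v = e + 1
    · rw [show aStep m (spans, s, e) v = (spans, s, v) from by simp [aStep, hv]]
      rw [show aRun m (v :: t) s e = aRun m t s v from by rw [aRun, if_pos hv]]
      exact ih s v spans
    · rw [show aStep m (spans, s, e) v
            = ((if e - s + 1 ≥ m then spans ++ [(s, e)] else spans), v, v) from by
          simp [aStep, hv]]
      rw [show aRun m (v :: t) s e
            = (if e - s + 1 ≥ m then [(s, e)] else []) ++ aRun m t v v from by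
          rw [aRun, if_neg hv]]
      rw [ih v v]
      split_ifs <;> simp

theorem aRun_eq (m : Int) (t : List Int) : ∀ (s e : Int),
    aRun m t s e =
      (if e + ((takeRun e t).1.length : Int) - s + 1 ≥ m
        then [(s, e + ((takeRun e t).1.length : Int))] else [])
        ++ specOf m (runs (takeRun e t).2) := by
  induction t with
  | nil => intro s e; simp [aRun, takeRun, runs, specOf]
  | cons y t ih =>
    intro s e
    by_cases hy : y = e + 1
    · simp only [aRun, takeRun, if_pos hy]
      rw [ih s y]
      subst hy
      have : (e + 1) + ((takeRun (e+1) t).1.length : Int) = e + (((takeRun (e+1) t).1.length : Int) + 1) := by ring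
      simp only [List.length_cons]
      push_cast
      rw [this]
    · simp only [aRun, takeRun, if_neg hy]
      rw [ih y y]
      have hrw : runs (y :: t) = (y :: (takeRun y t).1) :: runs (takeRun y t).2 := by
        rw [runs]
      simp only [List.length_nil, Nat.cast_zero]
      congr 1
      · norm_num
      · rw [hrw]
        simp only [specOf, List.filterMap_cons, emit]
        have : y + ((takeRun y t).1.length : Int) - y + 1 = ((takeRun y t).1.length : Int) + 1 := by ring
        rw [this]
        split_ifs <;> simp [specOf]

theorem a_eq_spec (xs : List Int) (m : Int) :
    find_contiguous_spans xs m = specOf m (runs xs) := by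
  cases xs with
  | nil => simp [find_contiguous_spans, runs, specOf]
  | cons x t =>
    show (let st := t.foldl (aStep m) ([], x, x);
      if st.2.2 - st.2.1 + 1 ≥ m then st.1 ++ [(st.2.1, st.2.2)] else st.1) = _
    rw [foldl_aRun m t x x [], List.nil_append, aRun_eq]
    rw [show runs (x :: t) = (x :: (takeRun x t).1) :: runs (takeRun x t).2 from by rw [runs]]
    simp only [specOf, List.filterMap_cons, emit]
    have : x + ((takeRun x t).1.length : Int) - x + 1 = ((takeRun x t).1.length : Int) + 1 := by ring
    rw [this]
    split_ifs <;> simp [specOf]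

-- ===== B side =====

theorem takeRun_append (p : Int) (l : List Int) : (takeRun p l).1 ++ (takeRun p l).2 = l := by
  induction l generalizing p with
  | nil => simp [takeRun]
  | cons y ys ih =>
    simp only [takeRun]
    split
    · simpa using ih y
    · simp

theorem takeRun_getD (l : List Int) : ∀ (p : Int) (j : Nat), j < (takeRun p l).1.length →
    (takeRun p l).1.getD j 0 = p + 1 + j := by
  induction l with
  | nil => intro p j h; simp [takeRun] at h
  | cons y ys ih =>
    intro p j h
    by_cases hy : y = p + 1
    · simp only [takeRun, if_pos hy] at h ⊢
      cases j with
      | zero => simpa using hy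
      | succ k =>
        simp only [List.getD_cons_succ]
        rw [ih y k (by simpa using h), hy]
        push_cast; ring
    · simp [takeRun, if_neg hy] at h

theorem takeRun_stop (l : List Int) : ∀ (p y : Int) (ys : List Int),
    (takeRun p l).2 = y :: ys → y ≠ p + (takeRun p l).1.length + 1 := by
  induction l with
  | nil => intro p y ys h; simp [takeRun] at h
  | cons z zs ih =>
    intro p y ys h
    by_cases hz : z = p + 1
    · simp only [takeRun, if_pos hz] at h ⊢
      intro hc
      apply ih z y ys h
      subst hz
      simp only [List.length_cons] at hc
      push_cast at hc ⊢
      omega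
    · simp only [takeRun, if_neg hz] at h ⊢
      simp only [List.cons.injEq] at h
      simpa [h.1] using hz

-- the reference cut list: 0 and every run-start position, ending with the length
def cutsSpec : List Int → List Nat
  | [] => [0]
  | x :: t => 0 :: (cutsSpec (takeRun x t).2).map (fun e => ((takeRun x t).1.length + 1) + e)
termination_by l => l.length
decreasing_by exact Nat.lt_succ_of_le (takeRun_snd_length _ _)

theorem cutsSpec_head (v : List Int) : ∃ c, cutsSpec v = 0 :: c := by
  cases v with
  | nil => exact ⟨[], by rw [cutsSpec]⟩
  | cons x t => exact ⟨_, by rw [cutsSpec]⟩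

theorem cutsSpec_zip_lt (n : Nat) : ∀ (v : List Int), v.length ≤ n →
    ∀ p ∈ (cutsSpec v).zip (cutsSpec v).tail, p.1 < p.2 := by
  induction n with
  | zero =>
    intro v hv p hp
    have : v = [] := List.length_eq_zero_iff.mp (Nat.le_zero.mp hv)
    subst this
    rw [cutsSpec] at hp
    simp at hp
  | succ n ih =>
    intro v hv p hp
    cases v with
    | nil => rw [cutsSpec] at hp; simp at hp
    | cons x t =>
      have hslen : (takeRun x t).2.length ≤ n := by
        have h1 := takeRun_snd_length x t
        simp only [List.length_cons] at hv
        omega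
      rw [cutsSpec] at hp
      obtain ⟨c₁, hc₁⟩ := cutsSpec_head (takeRun x t).2
      rw [hc₁] at hp
      simp only [List.map_cons, List.tail_cons, List.zip_cons_cons, List.mem_cons] at hp
      rcases hp with rfl | hp
      · simp
      · rw [← List.map_cons, List.zip_map] at hp
        obtain ⟨q, hq, rfl⟩ := List.mem_map.mp hp
        have hqlt : q.1 < q.2 := by
          apply ih (takeRun x t).2 hslen q
          rw [hc₁]
          simpa using hq
        obtain ⟨a, b⟩ := q
        simp only [Prod.map] at hqlt ⊢
        omega

theorem bCuts_eq_cutsSpec (n : Nat) : ∀ (xs : List Int), xs.length ≤ n →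
    bCuts xs = cutsSpec xs := by
  induction n with
  | zero =>
    intro xs h
    have : xs = [] := List.length_eq_zero_iff.mp (Nat.le_zero.mp h)
    subst this; rw [cutsSpec]; simp [bCuts]
  | succ n ih =>
    intro xs h
    cases xs with
    | nil => rw [cutsSpec]; simp [bCuts]
    | cons x t =>
      have hslen : (takeRun x t).2.length ≤ n := by
        have h1 := takeRun_snd_length x t
        simp only [List.length_cons] at h
        omega
      set r := (takeRun x t).1 with hr
      set s := (takeRun x t).2 with hs
      set L := r.length + 1 with hL
      have hsplit : x :: t = (x :: r) ++ s := by
        simp [hr, hs, takeRun_append]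
      have hgetRun : ∀ j : Nat, j < L → (x :: t).getD j 0 = x + j := by
        intro j hj
        rw [hsplit, List.getD_append _ _ _ _ (by simp only [List.length_cons]; omega)]
        cases j with
        | zero => simp
        | succ k =>
          simp only [List.getD_cons_succ]
          rw [takeRun_getD t x k (by rw [← hr]; omega)]
          push_cast; ring
      have hgetShift : ∀ j : Nat, (x :: t).getD (L + j) 0 = s.getD j 0 := by
        intro j
        rw [hsplit, List.getD_append_right _ _ _ _ (by simp only [List.length_cons]; omega)]
        congr 1
        simp only [List.length_cons]
        omega
      have hcond : ∀ k ∈ List.range s.length, bCond (x :: t) (L + k) = bCond s k := by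
        intro k hk
        rw [List.mem_range] at hk
        cases k with
        | zero =>
          -- cut at the start of the second run: maximality of takeRun
          obtain ⟨y, ys, hys⟩ : ∃ y ys, s = y :: ys := by
            cases hsc : s with
            | nil => rw [hsc] at hk; simp at hk
            | cons y ys => exact ⟨y, ys, rfl⟩
          have hstop : y ≠ x + (r.length : Int) + 1 := by
            have := takeRun_stop t x y ys (by rw [← hs, hys])
            rwa [← hr] at this
          have h1 : (x :: t).getD (L + 0) 0 = y := by
            have := hgetShift 0
            rw [hys] at this
            simpa using this
          have h2 : (x :: t).getD (L + 0 - 1) 0 = x + (r.length : Int) := by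
            rw [show L + 0 - 1 = r.length from by omega]
            have := hgetRun r.length (by omega)
            simpa using this
          have hA : bCond (x :: t) (L + 0) = true := by
            simp only [bCond, h1, h2]
            simp [hL, hstop]
          have hB : bCond s 0 = true := by simp [bCond]
          rw [hA, hB]
        | succ j =>
          have h1 : (x :: t).getD (L + (j + 1)) 0 = s.getD (j + 1) 0 := hgetShift (j + 1)
          have h2 : (x :: t).getD (L + (j + 1) - 1) 0 = s.getD j 0 := by
            rw [show L + (j + 1) - 1 = L + j from by omega, hgetShift j]
          have hA : bCond (x :: t) (L + (j + 1)) = (!(s.getD (j + 1) 0 == s.getD j 0 + 1)) := by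
            simp only [bCond, h1, h2]
            rw [show ((L + (j + 1) == 0) = false) from by simp [hL], Bool.false_or]
          have hB : bCond s (j + 1) = (!(s.getD (j + 1) 0 == s.getD j 0 + 1)) := by
            simp only [bCond, Nat.add_sub_cancel]
            rw [show ((j + 1 == 0) = false) from by simp, Bool.false_or]
          rw [hA, hB]
      have hfirst : (List.range L).filter (bCond (x :: t)) = [0] := by
        have hrL : List.range L = 0 :: (List.range r.length).map (fun k => 1 + k) := by
          rw [hL, Nat.add_comm, List.range_add]
          simp
        rw [hrL, List.filter_cons, List.filter_map]
        have hnil : (List.range r.length).filter (bCond (x :: t) ∘ fun k => 1 + k) = [] := by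
          rw [List.filter_eq_nil_iff]
          intro k hk
          rw [List.mem_range] at hk
          have e1 : (x :: t).getD (1 + k) 0 = x + ((1 + k : Nat) : Int) := hgetRun (1 + k) (by omega)
          have e2 : (x :: t).getD (1 + k - 1) 0 = x + (k : Int) := by
            rw [show 1 + k - 1 = k from by omega]
            have := hgetRun k (by omega)
            simpa using this
          simp only [Function.comp_apply, bCond, e1, e2, Bool.or_eq_true, beq_iff_eq,
            Bool.not_eq_eq_eq_not, Bool.not_true, beq_eq_false_iff_ne, ne_eq, not_or,
            Decidable.not_not]
          constructor
          · omega
          · push_cast; ring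
        rw [hnil]
        have h0 : bCond (x :: t) 0 = true := by simp [bCond]
        simp [h0]
      have hsecond : ((List.range s.length).map (fun k => L + k)).filter (bCond (x :: t))
          = ((List.range s.length).filter (bCond s)).map (fun k => L + k) := by
        rw [List.filter_map]
        congr 1
        apply List.filter_congr
        intro k hk
        simpa using hcond k hk
      have ihs : bCuts s = cutsSpec s := ih s hslen
      have hfin : (x :: t).length = L + s.length := by
        conv_lhs => rw [hsplit]
        simp only [List.length_append, List.length_cons]
        omega
      rw [show cutsSpec (x :: t) = 0 :: (cutsSpec s).map (fun e => L + e) from by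
            rw [cutsSpec, ← hr, ← hs, ← hL]]
      rw [← ihs]
      simp only [bCuts]
      rw [hfin, List.range_add, List.filter_append, hfirst, hsecond]
      simp [List.map_append]

-- the second stage, run on an arbitrary cut list
def pairsOf (xs : List Int) (m : Int) (c : List Nat) : List (Int × Int) :=
  ((c.zip c.tail).filter (fun p => decide (((p.2 : Int) - (p.1 : Int)) ≥ m))).map
    (fun p => (xs.getD p.1 0, xs.getD (p.2 - 1) 0))

theorem pairs_eq_spec (n : Nat) : ∀ (xs : List Int), xs.length ≤ n → ∀ (m : Int),
    pairsOf xs m (cutsSpec xs) = specOf m (runs xs) := by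
  induction n with
  | zero =>
    intro xs h m
    have : xs = [] := List.length_eq_zero_iff.mp (Nat.le_zero.mp h)
    subst this; rw [cutsSpec]; simp [pairsOf, runs, specOf]
  | succ n ih =>
    intro xs h m
    cases xs with
    | nil => rw [cutsSpec]; simp [pairsOf, runs, specOf]
    | cons x t =>
      have hslen : (takeRun x t).2.length ≤ n := by
        have h1 := takeRun_snd_length x t
        simp only [List.length_cons] at h
        omega
      set r := (takeRun x t).1 with hr
      set s := (takeRun x t).2 with hs
      set L := r.length + 1 with hL
      have hsplit : x :: t = (x :: r) ++ s := by simp [hr, hs, takeRun_append]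
      have hgetRun : ∀ j : Nat, j < L → (x :: t).getD j 0 = x + j := by
        intro j hj
        rw [hsplit, List.getD_append _ _ _ _ (by simp only [List.length_cons]; omega)]
        cases j with
        | zero => simp
        | succ k =>
          simp only [List.getD_cons_succ]
          rw [takeRun_getD t x k (by rw [← hr]; omega)]
          push_cast; ring
      have hgetShift : ∀ j : Nat, (x :: t).getD (L + j) 0 = s.getD j 0 := by
        intro j
        rw [hsplit, List.getD_append_right _ _ _ _ (by simp only [List.length_cons]; omega)]
        congr 1
        simp only [List.length_cons]
        omega
      obtain ⟨c₁, hc₁⟩ := cutsSpec_head s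
      have hzip : ((0 :: (cutsSpec s).map (fun e => L + e)).zip
              ((0 :: (cutsSpec s).map (fun e => L + e)).tail))
          = (0, L + 0) :: ((cutsSpec s).zip (cutsSpec s).tail).map
              (Prod.map (fun e => L + e) (fun e => L + e)) := by
        conv_lhs => rw [hc₁]
        conv_rhs => rw [hc₁]
        simp only [List.map_cons, List.tail_cons, List.zip_cons_cons]
        rw [← List.map_cons, List.zip_map]
      have hfc : ∀ p ∈ (cutsSpec s).zip (cutsSpec s).tail,
          ((fun p : Nat × Nat => decide (((p.2 : Int) - (p.1 : Int)) ≥ m)) ∘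
            Prod.map (fun e => L + e) (fun e => L + e)) p
            = (fun p : Nat × Nat => decide (((p.2 : Int) - (p.1 : Int)) ≥ m)) p := by
        rintro ⟨a, b⟩ _
        simp only [Function.comp_apply, Prod.map]
        rw [decide_eq_decide]
        push_cast
        omega
      have htail :
          ((((cutsSpec s).zip (cutsSpec s).tail).map
              (Prod.map (fun e => L + e) (fun e => L + e))).filter
            (fun p : Nat × Nat => decide (((p.2 : Int) - (p.1 : Int)) ≥ m))).map
            (fun p : Nat × Nat => ((x :: t).getD p.1 0, (x :: t).getD (p.2 - 1) 0))
          = specOf m (runs s) := by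
        rw [List.filter_map, List.filter_congr hfc, List.map_map]
        rw [← ih s hslen m]
        unfold pairsOf
        apply List.map_congr_left
        rintro ⟨a, b⟩ hp
        have hpZ : (a, b) ∈ (cutsSpec s).zip (cutsSpec s).tail := List.mem_of_mem_filter hp
        have hab : a < b := cutsSpec_zip_lt n s hslen (a, b) hpZ
        simp only [Function.comp_apply, Prod.map]
        have e1 : (x :: t).getD (L + a) 0 = s.getD a 0 := hgetShift a
        have e2 : (x :: t).getD (L + b - 1) 0 = s.getD (b - 1) 0 := by
          rw [show L + b - 1 = L + (b - 1) from by omega, hgetShift]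
        rw [e1, e2]
      rw [show runs (x :: t) = (x :: (takeRun x t).1) :: runs (takeRun x t).2 from by rw [runs]]
      rw [← hr, ← hs]
      rw [show cutsSpec (x :: t) = 0 :: (cutsSpec s).map (fun e => L + e) from by
            rw [cutsSpec, ← hr, ← hs, ← hL]]
      unfold pairsOf
      rw [hzip, List.filter_cons]
      rw [show specOf m ((x :: r) :: runs s)
            = (if ((r.length : Int) + 1 ≥ m) then (x, x + (r.length : Int)) :: specOf m (runs s)
               else specOf m (runs s)) from by
          simp only [specOf, List.filterMap_cons, emit]
          split_ifs <;> rfl]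
      by_cases hcnd : m ≤ (L : Int)
      · rw [if_pos (by simp only [Nat.add_zero]; rw [decide_eq_true_eq]; push_cast; omega)]
        rw [if_pos (by rw [hL] at hcnd; push_cast at hcnd ⊢; omega)]
        rw [List.map_cons, htail]
        congr 1
        show ((x :: t).getD (0 : Nat) 0, (x :: t).getD (L + 0 - 1) 0) = _
        have e1 : (x :: t).getD (0 : Nat) 0 = x := by simp
        have e2 : (x :: t).getD (L + 0 - 1) 0 = x + (r.length : Int) := by
          rw [show L + 0 - 1 = r.length from by omega]
          have := hgetRun r.length (by omega)
          simpa using this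
        rw [e1, e2]
      · rw [if_neg (by simp only [Nat.add_zero]; rw [decide_eq_true_eq]; push_cast; omega)]
        rw [if_neg (by rw [hL] at hcnd; push_cast at hcnd ⊢; omega)]
        rw [htail]

theorem b_eq_spec (xs : List Int) (m : Int) :
    find_contiguous_spans_alt xs m = specOf m (runs xs) := by
  show pairsOf xs m (bCuts xs) = _
  rw [bCuts_eq_cutsSpec xs.length xs (Nat.le_refl _)]
  exact pairs_eq_spec xs.length xs (Nat.le_refl _) m

-- ===== VERDICT (by name: the statement is the Claim_ definition above) =====
theorem find_contiguous_spans_spec : Claim_equal_find_contiguous_spans := by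
  intro xs m _
  unfold Spec_find_contiguous_spans
  rw [a_eq_spec, b_eq_spec]
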